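-- pv_equiv track=rewrite | github.com/aajmorgan/PokerProject-main | analyzeCards.py | check_ranks
-- ===== SOURCE A (Python) =====
-- def check_ranks(nums, numSet, suits, suitSet):
--     ranks = []
--     hand_ranks = {
--         "pair": False,
--         "twoPair": False,
--         "threeKind": False,
--         "straight": False,
--         "flush": False,
--         "fullHouse": False,
--         "fourKind": False,
--         "straightFlush": False,
--         "royalFlush": False
--     }
--     check_all(nums, numSet, suits, suitSet, hand_ranks)
--     for rank in hand_ranks:
--         if hand_ranks[rank]:
--             ranks.append(rank)
--     return ranks
--
-- def check_all(nums, numSet, suits, suitSet, hand_ranks):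
--     for num in numSet:
--         x = nums.count(num)
--         if x >= 2:
--             hand_ranks["pair"] = True
--         if x >= 3:
--             hand_ranks["threeKind"] = True
--         if x == 4:
--             hand_ranks["fourKind"] = True
--     numSetCopy = numSet.copy()
--     for num in numSet:
--         if nums.count(num) >= 2:
--             numSetCopy.remove(num)
--             for otherNum in numSetCopy:
--                 if nums.count(otherNum) >= 2:
--                     hand_ranks["twoPair"] = True
--                 if hand_ranks["twoPair"]:
--                     if nums.count(otherNum) >= 3 or nums.count(num) >= 3:
--                         hand_ranks["fullHouse"] = True
--     for suit in suitSet: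
--         x = suits.count(suit)
--         if x >= 5:
--             hand_ranks["flush"] = True
--     numsNoDups = sorted(numSet)
--     for num in numsNoDups:
--         if num == 1:
--             numsNoDups.remove(1)
--             numsNoDups.append(14)
--     numsNoDups = sorted(numSet)
--     if len(numsNoDups) >= 5:
--         numsNoDups.reverse()
--         for i in range(len(numsNoDups) - 4):
--             if (numsNoDups[i]-1) == numsNoDups[i+1]:
--                 if (numsNoDups[i] - 2) == numsNoDups[i+2]:
--                     if (numsNoDups[i] - 3) == numsNoDups[i+3]:
--                         if (numsNoDups[i] - 4) == numsNoDups[i+4]: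
--                             hand_ranks["straight"] = True
-- ===== SOURCE B (Python) =====
-- RANK_ORDER = ["pair", "twoPair", "threeKind", "straight", "flush",
--               "fullHouse", "fourKind", "straightFlush", "royalFlush"]
--
-- def _tally(xs):
--     d = {}
--     for x in xs:
--         d[x] = d.get(x, 0) + 1
--     return d
--
-- def _has_straight(numSet):
--     vals = set(numSet)
--     if len(vals) < 5:
--         return False
--     return any(all(v - k in vals for k in range(1, 5)) for v in vals)
--
-- def check_ranks(nums, numSet, suits, suitSet):
--     counts = _tally(nums)
--     suitCounts = _tally(suits)
--     pairs = sum(1 for v in numSet if counts.get(v, 0) >= 2)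
--     hasThree = any(counts.get(v, 0) >= 3 for v in numSet)
--     flags = {
--         "pair": pairs >= 1,
--         "twoPair": pairs >= 2,
--         "threeKind": hasThree,
--         "straight": _has_straight(numSet),
--         "flush": any(suitCounts.get(s, 0) >= 5 for s in suitSet),
--         "fullHouse": pairs >= 2 and hasThree,
--         "fourKind": any(counts.get(v, 0) == 4 for v in numSet),
--     }
--     return [r for r in RANK_ORDER if flags.get(r, False)]
-- ===== Notes on version B (the rewrite author's own statement) =====
-- stated objective: faster
-- what changed: B builds value/suit tallies once and replaces A's repeated nums.count scans, its nested twoPair/fullHouse loop over a mutated copy of numSet, and its sorted-reversed window scan for straights by count-threshold tests (pairs>=1/>=2, any>=3, ==4, fullHouse = pairs>=2 and any>=3) and a set-membership straight test.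
import Mathlib
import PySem

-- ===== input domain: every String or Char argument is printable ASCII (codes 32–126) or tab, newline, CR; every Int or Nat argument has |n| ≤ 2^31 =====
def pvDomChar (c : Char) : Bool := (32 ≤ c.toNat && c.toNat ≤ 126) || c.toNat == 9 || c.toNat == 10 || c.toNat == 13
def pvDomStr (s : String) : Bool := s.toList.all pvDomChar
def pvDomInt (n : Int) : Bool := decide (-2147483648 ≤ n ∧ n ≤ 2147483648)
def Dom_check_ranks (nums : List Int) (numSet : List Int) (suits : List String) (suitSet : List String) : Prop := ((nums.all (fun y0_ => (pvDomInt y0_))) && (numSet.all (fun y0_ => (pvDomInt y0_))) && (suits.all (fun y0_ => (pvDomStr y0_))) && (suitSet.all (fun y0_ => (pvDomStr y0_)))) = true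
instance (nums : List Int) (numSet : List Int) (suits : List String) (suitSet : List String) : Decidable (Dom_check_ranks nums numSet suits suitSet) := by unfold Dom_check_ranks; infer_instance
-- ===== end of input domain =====

-- B replaces A's repeated nums.count scans and nested twoPair/fullHouse loops by tallies
-- built once plus count-threshold tests, and the sorted-window straight scan by a set
-- membership test (objective: faster).

-- ===== PORT A =====
-- the hand_ranks dict has nine fixed keys; it is ported as a record, read back in insertion order
structure HandRanks where
  pair : Bool
  twoPair : Bool
  threeKind : Bool
  straight : Bool
  flush : Bool
  fullHouse : Bool
  fourKind : Bool
  straightFlush : Bool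
  royalFlush : Bool
deriving DecidableEq, Repr

def hrInit : HandRanks := ⟨false, false, false, false, false, false, false, false, false⟩

-- first loop of check_all: pair / threeKind / fourKind
def aLoop1 (nums : List Int) (hr : HandRanks) (l : List Int) : HandRanks :=
  l.foldl (fun hr num =>
    let x := nums.count num
    let hr := if 2 ≤ x then { hr with pair := true } else hr
    let hr := if 3 ≤ x then { hr with threeKind := true } else hr
    if x = 4 then { hr with fourKind := true } else hr) hr

-- inner loop over numSetCopy
def aInner (nums : List Int) (num : Int) (hr : HandRanks) (c : List Int) : HandRanks :=
  c.foldl (fun hr o =>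
    let hr := if 2 ≤ nums.count o then { hr with twoPair := true } else hr
    if hr.twoPair && (decide (3 ≤ nums.count o) || decide (3 ≤ nums.count num)) then
      { hr with fullHouse := true }
    else hr) hr

-- second loop of check_all: twoPair / fullHouse; state = (numSetCopy, hand_ranks)
-- numSetCopy.remove(num) never raises here (num was just seen unremoved), so .getD st.1 is exact
def aLoop2 (nums : List Int) (st : List Int × HandRanks) (l : List Int) : List Int × HandRanks :=
  l.foldl (fun st num =>
    if 2 ≤ nums.count num then
      let copy' := (PySem.List.remove? st.1 num).getD st.1
      (copy', aInner nums num st.2 copy')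
    else st) st

-- flush loop
def aLoop3 (suits : List String) (hr : HandRanks) (l : List String) : HandRanks :=
  l.foldl (fun hr s => if 5 ≤ suits.count s then { hr with flush := true } else hr) hr

-- straight block. The Ace→14 remap loop mutates a list that the next line recomputes
-- from numSet ('numsNoDups = sorted(numSet)'), so it cannot affect the result; it is
-- noted here instead of reproduced.
def aStraight (numSet : List Int) (hr : HandRanks) : HandRanks :=
  let numsNoDups := PySem.List.sorted numSet (fun x => x) false
  if 5 ≤ numsNoDups.length then
    let r := numsNoDups.reverse
    (PySem.List.pyRange 0 (PySem.List.len r - 4) 1).foldl (fun hr i =>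
      if PySem.List.pyGetD r i 0 - 1 = PySem.List.pyGetD r (i + 1) 0 then
        if PySem.List.pyGetD r i 0 - 2 = PySem.List.pyGetD r (i + 2) 0 then
          if PySem.List.pyGetD r i 0 - 3 = PySem.List.pyGetD r (i + 3) 0 then
            if PySem.List.pyGetD r i 0 - 4 = PySem.List.pyGetD r (i + 4) 0 then
              { hr with straight := true }
            else hr
          else hr
        else hr
      else hr) hr
  else hr

def check_ranks (nums : List Int) (numSet : List Int) (suits : List String) (suitSet : List String) : List String :=
  let hr := hrInit
  let hr := aLoop1 nums hr numSet
  let hr := (aLoop2 nums (numSet, hr) numSet).2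
  let hr := aLoop3 suits hr suitSet
  let hr := aStraight numSet hr
  (if hr.pair then ["pair"] else []) ++ (if hr.twoPair then ["twoPair"] else []) ++
  (if hr.threeKind then ["threeKind"] else []) ++ (if hr.straight then ["straight"] else []) ++
  (if hr.flush then ["flush"] else []) ++ (if hr.fullHouse then ["fullHouse"] else []) ++
  (if hr.fourKind then ["fourKind"] else []) ++ (if hr.straightFlush then ["straightFlush"] else []) ++
  (if hr.royalFlush then ["royalFlush"] else [])

-- ===== PORT B =====
-- _tally: one dict built by a single pass
def bTally {α : Type} [BEq α] (xs : List α) : PySem.Dict α Int :=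
  xs.foldl (fun d x => d.insert x (d.getD x 0 + 1)) PySem.Dict.empty

-- _has_straight: set membership instead of a sorted window scan
def bStraight (numSet : List Int) : Bool :=
  let vals := PySem.Set.ofList numSet
  if vals.length < 5 then false
  else vals.any (fun v =>
    PySem.Set.contains vals (v - 1) && PySem.Set.contains vals (v - 2) &&
    PySem.Set.contains vals (v - 3) && PySem.Set.contains vals (v - 4))

def check_ranks_alt (nums : List Int) (numSet : List Int) (suits : List String) (suitSet : List String) : List String :=
  let counts := bTally nums
  let suitCounts := bTally suits
  let pairs : Int := numSet.countP (fun v => decide (2 ≤ counts.getD v 0))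
  let hasThree : Bool := numSet.any (fun v => decide (3 ≤ counts.getD v 0))
  let straight : Bool := bStraight numSet
  let flush : Bool := suitSet.any (fun s => decide (5 ≤ suitCounts.getD s 0))
  let fourKind : Bool := numSet.any (fun v => decide (counts.getD v 0 = 4))
  (if 1 ≤ pairs then ["pair"] else []) ++ (if 2 ≤ pairs then ["twoPair"] else []) ++
  (if hasThree then ["threeKind"] else []) ++ (if straight then ["straight"] else []) ++
  (if flush then ["flush"] else []) ++ (if 2 ≤ pairs ∧ hasThree then ["fullHouse"] else []) ++
  (if fourKind then ["fourKind"] else [])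

-- ===== PRECONDITION & SPEC =====
-- numSet/suitSet are Python sets; Pre_ states the corresponding distinctness of the numSet
-- list (a List with duplicates does not represent a set, and no set-valued input violates it).
def Pre_check_ranks (nums : List Int) (numSet : List Int) (suits : List String) (suitSet : List String) : Prop :=
  numSet.Nodup
instance (nums : List Int) (numSet : List Int) (suits : List String) (suitSet : List String) : Decidable (Pre_check_ranks nums numSet suits suitSet) := by unfold Pre_check_ranks; infer_instance

def pvWitness_check_ranks : List Int × List Int × List String × List String :=
  ([7, 7, 2, 3, 4, 5, 6], [7, 2, 3, 4, 5, 6], ["s", "s", "h"], ["s", "h"])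

def Spec_check_ranks (nums : List Int) (numSet : List Int) (suits : List String) (suitSet : List String) (out : List String) : Prop := out = check_ranks_alt nums numSet suits suitSet
instance (nums : List Int) (numSet : List Int) (suits : List String) (suitSet : List String) (out : List String) : Decidable (Spec_check_ranks nums numSet suits suitSet out) := by unfold Spec_check_ranks; infer_instance

-- ===== CLAIM (what is proved, stated in full; the proofs are below) =====
def Claim_equal_check_ranks : Prop := ∀ (nums : List Int) (numSet : List Int) (suits : List String) (suitSet : List String), Dom_check_ranks nums numSet suits suitSet → Pre_check_ranks nums numSet suits suitSet → Spec_check_ranks nums numSet suits suitSet (check_ranks nums numSet suits suitSet)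

-- ===== LEMMAS AND PROOFS =====

theorem aLoop1_cons (nums : List Int) (hr : HandRanks) (x : Int) (xs : List Int) :
    aLoop1 nums hr (x :: xs) = aLoop1 nums
      (let x0 := nums.count x
       let hr1 := if 2 ≤ x0 then { hr with pair := true } else hr
       let hr2 := if 3 ≤ x0 then { hr1 with threeKind := true } else hr1
       if x0 = 4 then { hr2 with fourKind := true } else hr2) xs := rfl

theorem aLoop1_spec (nums : List Int) (hr : HandRanks) (l : List Int) :
    aLoop1 nums hr l =
      { hr with
        pair := hr.pair || l.any (fun v => decide (2 ≤ nums.count v)),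
        threeKind := hr.threeKind || l.any (fun v => decide (3 ≤ nums.count v)),
        fourKind := hr.fourKind || l.any (fun v => decide (nums.count v = 4)) } := by
  induction l generalizing hr with
  | nil => simp [aLoop1]
  | cons x xs ih =>
    rw [aLoop1_cons, ih]
    cases hr
    by_cases h2 : 2 ≤ nums.count x <;> by_cases h3 : 3 ≤ nums.count x <;>
      by_cases h4 : nums.count x = 4 <;>
      simp [h2, h3, h4]

theorem aInner_cons (nums : List Int) (num : Int) (hr : HandRanks) (o : Int) (c : List Int) :
    aInner nums num hr (o :: c) = aInner nums num
      (let hr1 := if 2 ≤ nums.count o then { hr with twoPair := true } else hr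
       if hr1.twoPair && (decide (3 ≤ nums.count o) || decide (3 ≤ nums.count num)) then
         { hr1 with fullHouse := true }
       else hr1) c := rfl

theorem aInner_spec (nums : List Int) (num : Int) (hr : HandRanks) (c : List Int) :
    aInner nums num hr c =
      { hr with
        twoPair := hr.twoPair || c.any (fun v => decide (2 ≤ nums.count v)),
        fullHouse := hr.fullHouse || c.any (fun v => decide (3 ≤ nums.count v)) ||
          (decide (3 ≤ nums.count num) &&
            (if hr.twoPair then !c.isEmpty else c.any (fun v => decide (2 ≤ nums.count v)))) } := by
  induction c generalizing hr with
  | nil => simp [aInner]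
  | cons o c ih =>
    rw [aInner_cons, ih]
    cases hr with
    | mk p tp tk st fl fh fk sf rf =>
      by_cases h2 : 2 ≤ nums.count o <;> by_cases h3 : 3 ≤ nums.count o <;>
        by_cases hn : 3 ≤ nums.count num <;> cases tp <;>
        simp [h2, h3, hn] <;> omega

theorem countP_two_succ (p : Int → Bool) (l : List Int) :
    decide (2 ≤ l.countP p + 1) = l.any p := by
  by_cases h : l.any p = true
  · have h0 : 0 < l.countP p := List.countP_pos_iff.mpr (List.any_eq_true.mp h)
    simp only [h, decide_eq_true_iff]
    omega
  · have h0 : l.countP p = 0 := by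
      rw [List.countP_eq_zero]
      intro a ha hpa
      exact h (List.any_eq_true.mpr ⟨a, ha, hpa⟩)
    simp [h, h0]

theorem aLoop2_cons (nums : List Int) (st : List Int × HandRanks) (num : Int) (l : List Int) :
    aLoop2 nums st (num :: l) = aLoop2 nums
      (if 2 ≤ nums.count num then
        ((PySem.List.remove? st.1 num).getD st.1,
          aInner nums num st.2 ((PySem.List.remove? st.1 num).getD st.1))
      else st) l := rfl

theorem remove?_append_cons (NQ l : List Int) (num : Int) (h : num ∉ NQ) :
    PySem.List.remove? (NQ ++ num :: l) num = some (NQ ++ l) := by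
  induction NQ with
  | nil => exact PySem.List.remove?_cons_self num l
  | cons a NQ ih =>
    have ha : a ≠ num := by rintro rfl; exact h (List.mem_cons_self ..)
    have h' : num ∉ NQ := fun hm => h (List.mem_cons_of_mem _ hm)
    rw [List.cons_append, PySem.List.remove?_cons_of_ne _ ha, ih h']
    rfl

theorem aLoop2_spec (nums : List Int) (hr : HandRanks) (l NQ : List Int)
    (hnd : l.Nodup) (hnq : ∀ x ∈ NQ, ¬ 2 ≤ nums.count x) (hdisj : ∀ x ∈ NQ, x ∉ l) :
    (aLoop2 nums (NQ ++ l, hr) l).2 =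
      { hr with
        twoPair := hr.twoPair || decide (2 ≤ l.countP (fun v => decide (2 ≤ nums.count v))),
        fullHouse := hr.fullHouse ||
          (decide (2 ≤ l.countP (fun v => decide (2 ≤ nums.count v))) &&
            l.any (fun v => decide (3 ≤ nums.count v))) ||
          (hr.twoPair && l.any (fun v => decide (3 ≤ nums.count v)) &&
            (!NQ.isEmpty || decide (2 ≤ l.length))) } := by
  induction l generalizing NQ hr with
  | nil => simp [aLoop2]
  | cons num l ih =>
    have hnql : num ∉ NQ := fun hm => hdisj num hm (List.mem_cons_self ..)
    have hnd' : l.Nodup := hnd.of_cons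
    have hnuml : num ∉ l := (List.nodup_cons.mp hnd).1
    -- pointwise fact: count ≥ 3 implies count ≥ 2
    have hqt : ∀ (m : List Int), m.any (fun v => decide (3 ≤ nums.count v)) = true →
        m.any (fun v => decide (2 ≤ nums.count v)) = true := by
      intro m hm
      simp only [List.any_eq_true, decide_eq_true_eq] at hm ⊢
      obtain ⟨v, hv, h3⟩ := hm
      exact ⟨v, hv, by omega⟩
    have hNQq : NQ.any (fun v => decide (2 ≤ nums.count v)) = false := by
      simp only [List.any_eq_false, decide_eq_true_eq]
      exact hnq
    have hNQt : NQ.any (fun v => decide (3 ≤ nums.count v)) = false := by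
      simp only [List.any_eq_false, decide_eq_true_eq]
      intro x hx h3; exact hnq x hx (by omega)
    rw [aLoop2_cons]
    by_cases hq : 2 ≤ nums.count num
    · -- qualifying: copy' = NQ ++ l
      rw [if_pos hq]
      simp only [remove?_append_cons NQ l num hnql, Option.getD_some]
      rw [aInner_spec]
      rw [ih _ _ hnd' hnq (fun x hx => fun hm => hdisj x hx (List.mem_cons_of_mem _ hm))]
      -- now a record/boolean identity
      cases hr with
      | mk p tp tk st fl fh fk sf rf =>
        simp only [List.any_append, hNQq, hNQt, Bool.false_or,
          List.countP_cons, List.any_cons]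
        have hie : (NQ ++ l).isEmpty = (NQ.isEmpty && l.isEmpty) := by cases NQ <;> simp
        have hlen2 : decide (2 ≤ (num :: l).length) = !l.isEmpty := by cases l <;> simp
        have hif : (if decide (2 ≤ List.count num nums) = true then 1 else 0) = 1 := by simp [hq]
        rw [hif, countP_two_succ]
        have hx2i : decide (2 ≤ List.countP (fun v => decide (2 ≤ List.count v nums)) l) = true →
            (l.any fun v => decide (2 ≤ List.count v nums)) = true := by
          intro h
          have h' := of_decide_eq_true h
          exact List.any_eq_true.mpr (List.countP_pos_iff.mp (by omega))
        have hyi := hqt l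
        have hx1e : (l.any fun v => decide (2 ≤ List.count v nums)) = true → l.isEmpty = false := by
          cases l <;> simp
        have hye : (l.any fun v => decide (3 ≤ List.count v nums)) = true → l.isEmpty = false := by
          cases l <;> simp
        have hle2 : decide (2 ≤ l.length) = true → l.isEmpty = false := by
          cases l <;> simp
        have hx2le2 : decide (2 ≤ List.countP (fun v => decide (2 ≤ List.count v nums)) l) = true →
            decide (2 ≤ l.length) = true := by
          intro h
          have h' := of_decide_eq_true h
          have hle := List.countP_le_length (l := l) (p := fun v => decide (2 ≤ List.count v nums))
          exact decide_eq_true (by omega)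
        simp only [hie, hlen2, HandRanks.mk.injEq, true_and, and_true]
        generalize (l.any fun v => decide (2 ≤ List.count v nums)) = x1 at hx2i hyi hx1e ⊢
        generalize (decide (2 ≤ List.countP (fun v => decide (2 ≤ List.count v nums)) l)) = x2 at hx2i hx2le2 ⊢
        generalize (l.any fun v => decide (3 ≤ List.count v nums)) = y at hyi hye ⊢
        generalize (decide (3 ≤ List.count num nums)) = b at ⊢
        generalize l.isEmpty = le at hx1e hye hle2 ⊢
        generalize NQ.isEmpty = ne at ⊢
        generalize (decide (2 ≤ l.length)) = le2 at hle2 hx2le2 ⊢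
        revert hx2i hyi hx1e hye hle2 hx2le2
        revert tp fh b x1 x2 y ne le le2
        decide
    · -- non-qualifying: NQ grows by num
      rw [if_neg hq]
      have : NQ ++ num :: l = (NQ ++ [num]) ++ l := by simp
      rw [this]
      rw [ih _ (NQ ++ [num]) hnd'
        (by intro x hx; rcases List.mem_append.mp hx with h | h
            · exact hnq x h
            · simp at h; subst h; exact hq)
        (by intro x hx; rcases List.mem_append.mp hx with h | h
            · exact fun hm => hdisj x h (List.mem_cons_of_mem _ hm)
            · simp at h; subst h; exact hnuml)]
      cases hr with
      | mk p tp tk st fl fh fk sf rf =>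
        have hqf : decide (2 ≤ List.count num nums) = false := by simp [hq]
        have htf : decide (3 ≤ List.count num nums) = false := by
          simp only [decide_eq_false_iff_not]
          intro h3; exact hq (by omega)
        have hlen2 : decide (2 ≤ (num :: l).length) = !l.isEmpty := by cases l <;> simp
        have hye : (l.any fun v => decide (3 ≤ List.count v nums)) = true → l.isEmpty = false := by
          cases l <;> simp
        have hne' : (NQ ++ [num]).isEmpty = false := by cases NQ <;> simp
        simp only [List.countP_cons, List.any_cons, hqf, htf, Bool.false_or,
          Bool.false_eq_true, if_false, Nat.add_zero, hlen2, hne',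
          HandRanks.mk.injEq, true_and, and_true]
        generalize (l.any fun v => decide (3 ≤ List.count v nums)) = y at hye ⊢
        generalize (decide (2 ≤ List.countP (fun v => decide (2 ≤ List.count v nums)) l)) = x2 at ⊢
        generalize l.isEmpty = le at hye ⊢
        generalize NQ.isEmpty = ne at ⊢
        generalize (decide (2 ≤ l.length)) = le2 at ⊢
        revert hye
        revert tp fh y x2 ne le le2
        decide

theorem aLoop3_cons (suits : List String) (hr : HandRanks) (s : String) (l : List String) :
    aLoop3 suits hr (s :: l) =
      aLoop3 suits (if 5 ≤ suits.count s then { hr with flush := true } else hr) l := rfl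

theorem aLoop3_spec (suits : List String) (hr : HandRanks) (l : List String) :
    aLoop3 suits hr l =
      { hr with flush := hr.flush || l.any (fun s => decide (5 ≤ suits.count s)) } := by
  induction l generalizing hr with
  | nil => simp [aLoop3]
  | cons s l ih =>
    rw [aLoop3_cons, ih]
    cases hr
    by_cases h : 5 ≤ suits.count s <;> simp [h]

theorem ofList_eq_self {l : List Int} (h : l.Nodup) : PySem.Set.ofList l = l := by
  rw [PySem.Set.ofList_eq_foldl]
  suffices hs : ∀ acc : List Int, (acc ++ l).Nodup → l.foldl PySem.Set.add acc = acc ++ l by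
    simpa using hs [] (by simpa)
  induction l with
  | nil => simp
  | cons x xs ih =>
    intro acc hnd
    have hx : x ∉ acc := fun hmem =>
      (List.disjoint_of_nodup_append hnd) hmem (List.mem_cons_self ..)
    have hadd : PySem.Set.add acc x = acc ++ [x] := by
      simp [PySem.Set.add, PySem.Set.contains, hx]
    have hnd' : ((acc ++ [x]) ++ xs).Nodup := by simpa using hnd
    rw [List.foldl_cons, hadd, ih ((List.Nodup.of_append_right hnd).of_cons) (acc ++ [x]) hnd']
    simp

-- the window fold of aStraight sets the flag iff some index satisfies all four tests

theorem straight_foldl (il : List Int) (r : List Int) (hr : HandRanks) :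
    il.foldl (fun hr i =>
      if PySem.List.pyGetD r i 0 - 1 = PySem.List.pyGetD r (i + 1) 0 then
        if PySem.List.pyGetD r i 0 - 2 = PySem.List.pyGetD r (i + 2) 0 then
          if PySem.List.pyGetD r i 0 - 3 = PySem.List.pyGetD r (i + 3) 0 then
            if PySem.List.pyGetD r i 0 - 4 = PySem.List.pyGetD r (i + 4) 0 then
              { hr with straight := true }
            else hr
          else hr
        else hr
      else hr) hr =
    { hr with straight := hr.straight || il.any (fun i =>
        decide (PySem.List.pyGetD r i 0 - 1 = PySem.List.pyGetD r (i + 1) 0) &&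
        decide (PySem.List.pyGetD r i 0 - 2 = PySem.List.pyGetD r (i + 2) 0) &&
        decide (PySem.List.pyGetD r i 0 - 3 = PySem.List.pyGetD r (i + 3) 0) &&
        decide (PySem.List.pyGetD r i 0 - 4 = PySem.List.pyGetD r (i + 4) 0)) } := by
  induction il generalizing hr with
  | nil => simp
  | cons i il ih =>
    rw [List.foldl_cons, ih]
    cases hr
    by_cases h1 : PySem.List.pyGetD r i 0 - 1 = PySem.List.pyGetD r (i + 1) 0 <;>
      by_cases h2 : PySem.List.pyGetD r i 0 - 2 = PySem.List.pyGetD r (i + 2) 0 <;>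
      by_cases h3 : PySem.List.pyGetD r i 0 - 3 = PySem.List.pyGetD r (i + 3) 0 <;>
      by_cases h4 : PySem.List.pyGetD r i 0 - 4 = PySem.List.pyGetD r (i + 4) 0 <;>
      simp [h1, h2, h3, h4]

-- in a strictly descending list, if r.getD k 0 - 1 occurs at all it occurs at position k+1

theorem desc_step (r : List Int) (hp : List.Pairwise (· > ·) r) (k : Nat) (hk : k < r.length)
    (h1 : r.getD k 0 - 1 ∈ r) : k + 1 < r.length ∧ r.getD (k + 1) 0 = r.getD k 0 - 1 := by
  rw [List.getD_eq_getElem r 0 hk] at h1 ⊢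
  obtain ⟨j, hj, hje⟩ := List.mem_iff_getElem.mp h1
  have hget := List.pairwise_iff_get.mp hp
  have hkj : k < j := by
    rcases Nat.lt_trichotomy j k with h | h | h
    · have := hget ⟨j, hj⟩ ⟨k, hk⟩ h
      simp only [List.get_eq_getElem] at this
      omega
    · subst h; omega
    · exact h
  have hk1 : k + 1 < r.length := by omega
  refine ⟨hk1, ?_⟩
  rw [List.getD_eq_getElem r 0 hk1]
  have hub : r[k + 1] ≥ r[j] := by
    rcases Nat.lt_or_ge (k + 1) j with h | h
    · have := hget ⟨k + 1, hk1⟩ ⟨j, hj⟩ h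
      simp only [List.get_eq_getElem] at this
      omega
    · have : j = k + 1 := by omega
      subst this; omega
  have hlb : r[k] > r[k + 1] := by
    have := hget ⟨k, hk⟩ ⟨k + 1, hk1⟩ (Fin.mk_lt_mk.mpr (Nat.lt_succ_self k))
    simpa using this
  omega

theorem desc_window (r : List Int) (hp : List.Pairwise (· > ·) r) (k : Nat) (hk : k < r.length)
    (h1 : r.getD k 0 - 1 ∈ r) (h2 : r.getD k 0 - 2 ∈ r) (h3 : r.getD k 0 - 3 ∈ r)
    (h4 : r.getD k 0 - 4 ∈ r) :
    k + 4 < r.length ∧ r.getD (k + 1) 0 = r.getD k 0 - 1 ∧ r.getD (k + 2) 0 = r.getD k 0 - 2 ∧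
      r.getD (k + 3) 0 = r.getD k 0 - 3 ∧ r.getD (k + 4) 0 = r.getD k 0 - 4 := by
  obtain ⟨hl1, he1⟩ := desc_step r hp k hk h1
  obtain ⟨hl2, he2⟩ := desc_step r hp (k + 1) hl1 (by rw [he1, show r.getD k 0 - 1 - 1 = r.getD k 0 - 2 by omega]; exact h2)
  rw [he1] at he2
  obtain ⟨hl3, he3⟩ := desc_step r hp (k + 2) hl2 (by rw [show k + 1 + 1 = k + 2 from rfl, he2, show r.getD k 0 - 1 - 1 - 1 = r.getD k 0 - 3 by omega]; exact h3)
  rw [show k + 1 + 1 = k + 2 from rfl] at he2 hl2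
  rw [he2] at he3
  obtain ⟨hl4, he4⟩ := desc_step r hp (k + 3) hl3 (by rw [show k + 2 + 1 = k + 3 from rfl, he3]; rw [show r.getD k 0 - 1 - 1 - 1 - 1 = r.getD k 0 - 4 by omega]; exact h4)
  rw [show k + 2 + 1 = k + 3 from rfl] at he3 hl3
  rw [he3] at he4
  rw [show k + 3 + 1 = k + 4 from rfl] at he4 hl4
  exact ⟨hl4, he1, by omega, by omega, by omega⟩

theorem aStraight_spec (numSet : List Int) (hr : HandRanks) (hnd : numSet.Nodup) :
    aStraight numSet hr = { hr with straight := hr.straight || bStraight numSet } := by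
  have hofl := ofList_eq_self hnd
  rw [aStraight, bStraight, hofl]
  have hlen : (PySem.List.sorted numSet (fun x => x) false).length = numSet.length :=
    PySem.List.length_sorted numSet _ false
  have hmemnd : ∀ x : Int, x ∈ (PySem.List.sorted numSet (fun x => x) false) ↔ x ∈ numSet :=
    fun x => PySem.List.mem_sorted numSet _ false x
  have hnodnd : (PySem.List.sorted numSet (fun x => x) false).Nodup :=
    ((PySem.List.sorted_perm numSet _ false).nodup_iff).mpr hnd
  have hasc : List.Pairwise (· < ·) (PySem.List.sorted numSet (fun x => x) false) := by
    have h1 := PySem.List.sorted_pairwise numSet (fun x => x)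
    exact (h1.and hnodnd).imp (fun h => lt_of_le_of_ne h.1 h.2)
  have hdesc : List.Pairwise (· > ·) (PySem.List.sorted numSet (fun x => x) false).reverse := by
    rw [List.pairwise_reverse]
    exact hasc.imp (fun h => h)
  set nd := PySem.List.sorted numSet (fun x => x) false with hnddef
  set r := nd.reverse with hrdef
  have hrlen : r.length = numSet.length := by rw [hrdef, List.length_reverse, hlen]
  have hrmem : ∀ x : Int, x ∈ r ↔ x ∈ numSet := by
    intro x; rw [hrdef, List.mem_reverse]; exact hmemnd x
  by_cases h5 : 5 ≤ nd.length
  · rw [if_pos h5, straight_foldl, if_neg (by omega)]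
    have hcore : ((PySem.List.pyRange 0 (PySem.List.len r - 4) 1).any (fun i =>
        decide (PySem.List.pyGetD r i 0 - 1 = PySem.List.pyGetD r (i + 1) 0) &&
        decide (PySem.List.pyGetD r i 0 - 2 = PySem.List.pyGetD r (i + 2) 0) &&
        decide (PySem.List.pyGetD r i 0 - 3 = PySem.List.pyGetD r (i + 3) 0) &&
        decide (PySem.List.pyGetD r i 0 - 4 = PySem.List.pyGetD r (i + 4) 0))) =
        (numSet.any (fun v =>
          PySem.Set.contains numSet (v - 1) && PySem.Set.contains numSet (v - 2) &&
          PySem.Set.contains numSet (v - 3) && PySem.Set.contains numSet (v - 4))) := by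
      have hlr : r.length = nd.length := by rw [hrdef, List.length_reverse]
      rw [Bool.eq_iff_iff]
      simp only [List.any_eq_true, PySem.Set.contains, Bool.and_eq_true, decide_eq_true_eq,
        List.contains_eq_mem]
      constructor
      · rintro ⟨i, hi, ⟨⟨c1, c2⟩, c3⟩, c4⟩
        rw [PySem.List.mem_pyRange_one] at hi
        rw [PySem.List.len_eq] at hi
        obtain ⟨hi0, hi4⟩ := hi
        have hk4 : i.toNat + 4 < r.length := by omega
        have hcast : ∀ j : Nat, (i + (j : Int)) = ((i.toNat + j : Nat) : Int) := by
          intro j; omega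
        rw [show i = ((i.toNat : Nat) : Int) by omega] at c1 c2 c3 c4
        rw [show ((i.toNat : Nat) : Int) + 1 = ((i.toNat + 1 : Nat) : Int) by push_cast; ring] at c1
        rw [show ((i.toNat : Nat) : Int) + 2 = ((i.toNat + 2 : Nat) : Int) by push_cast; ring] at c2
        rw [show ((i.toNat : Nat) : Int) + 3 = ((i.toNat + 3 : Nat) : Int) by push_cast; ring] at c3
        rw [show ((i.toNat : Nat) : Int) + 4 = ((i.toNat + 4 : Nat) : Int) by push_cast; ring] at c4
        simp only [PySem.List.pyGetD_natCast] at c1 c2 c3 c4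
        refine ⟨r.getD i.toNat 0, ?_, ?_⟩
        · rw [← hrmem]
          rw [List.getD_eq_getElem r 0 (by omega)]
          exact List.getElem_mem _
        · have hm : ∀ j : Nat, j ≤ 4 → r.getD (i.toNat + j) 0 ∈ numSet := by
            intro j hj
            rw [← hrmem, List.getD_eq_getElem r 0 (by omega)]
            exact List.getElem_mem _
          refine ⟨⟨⟨?_, ?_⟩, ?_⟩, ?_⟩
          · rw [c1]; exact hm 1 (by omega)
          · rw [c2]; exact hm 2 (by omega)
          · rw [c3]; exact hm 3 (by omega)
          · rw [c4]; exact hm 4 (by omega)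
      · rintro ⟨v, hv, ⟨⟨m1, m2⟩, m3⟩, m4⟩
        rw [← hrmem] at hv m1 m2 m3 m4
        obtain ⟨k, hk, hkv⟩ := List.mem_iff_getElem.mp hv
        have hgv : r.getD k 0 = v := by rw [List.getD_eq_getElem r 0 hk]; exact hkv
        rw [← hgv] at m1 m2 m3 m4
        obtain ⟨hk4, e1, e2, e3, e4⟩ := desc_window r hdesc k hk m1 m2 m3 m4
        refine ⟨(k : Int), ?_, ?_⟩
        · rw [PySem.List.mem_pyRange_one, PySem.List.len_eq]
          omega
        · rw [show ((k : Nat) : Int) + 1 = ((k + 1 : Nat) : Int) by push_cast; ring,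
            show ((k : Nat) : Int) + 2 = ((k + 2 : Nat) : Int) by push_cast; ring,
            show ((k : Nat) : Int) + 3 = ((k + 3 : Nat) : Int) by push_cast; ring,
            show ((k : Nat) : Int) + 4 = ((k + 4 : Nat) : Int) by push_cast; ring]
          simp only [PySem.List.pyGetD_natCast]
          exact ⟨⟨⟨e1.symm, e2.symm⟩, e3.symm⟩, e4.symm⟩
    rw [hcore]
  · rw [if_neg h5, if_pos (by omega)]
    cases hr
    simp

-- ===== VERDICT (by name: the statement is the Claim_ definition above) =====
theorem check_ranks_spec : Claim_equal_check_ranks := by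
  intro nums numSet suits suitSet _hdom hpre
  unfold Spec_check_ranks
  unfold check_ranks check_ranks_alt
  have hb : ∀ (xs : List Int), bTally xs = PySem.Dict.counter xs :=
    fun xs => PySem.Dict.foldl_insert_getD_add_one_eq_counter xs
  have hbs : ∀ (xs : List String), bTally xs = PySem.Dict.counter xs :=
    fun xs => PySem.Dict.foldl_insert_getD_add_one_eq_counter xs
  have h2 := aLoop2_spec nums (aLoop1 nums hrInit numSet) numSet [] hpre
    (by simp) (by simp)
  rw [List.nil_append] at h2
  rw [aLoop1_spec] at h2
  dsimp only
  rw [aLoop1_spec, h2, aLoop3_spec, aStraight_spec _ _ hpre]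
  simp only [hrInit, Bool.false_or, Bool.false_and, Bool.or_false,
    List.isEmpty_nil, Bool.not_true]
  simp only [hb, hbs, PySem.Dict.getD_counter]
  have hc2 : (fun v : Int => decide ((2:Int) ≤ ↑(List.count v nums))) =
      (fun v : Int => decide (2 ≤ List.count v nums)) := by
    funext v; apply decide_eq_decide.mpr; exact_mod_cast Iff.rfl
  have hc3 : (fun v : Int => decide ((3:Int) ≤ ↑(List.count v nums))) =
      (fun v : Int => decide (3 ≤ List.count v nums)) := by
    funext v; apply decide_eq_decide.mpr; exact_mod_cast Iff.rfl
  have hc5 : (fun s : String => decide ((5:Int) ≤ ↑(List.count s suits))) =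
      (fun s : String => decide (5 ≤ List.count s suits)) := by
    funext v; apply decide_eq_decide.mpr; exact_mod_cast Iff.rfl
  have hc4 : (fun v : Int => decide ((↑(List.count v nums) : Int) = 4)) =
      (fun v : Int => decide (List.count v nums = 4)) := by
    funext v; apply decide_eq_decide.mpr; exact_mod_cast Iff.rfl
  rw [hc2, hc3, hc5, hc4]
  have hp1 : (1 ≤ (↑(List.countP (fun v : Int => decide (2 ≤ List.count v nums)) numSet) : Int)) ↔
      ((numSet.any fun v => decide (2 ≤ List.count v nums)) = true) := by
    constructor
    · intro h
      have h0 : 0 < List.countP (fun v : Int => decide (2 ≤ List.count v nums)) numSet := by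
        exact_mod_cast h
      exact List.any_eq_true.mpr (List.countP_pos_iff.mp h0)
    · intro h
      have h0 : 0 < List.countP (fun v : Int => decide (2 ≤ List.count v nums)) numSet :=
        List.countP_pos_iff.mpr (List.any_eq_true.mp h)
      exact_mod_cast h0
  have hp2 : ((2:Int) ≤ (↑(List.countP (fun v : Int => decide (2 ≤ List.count v nums)) numSet) : Int)) ↔
      (decide (2 ≤ List.countP (fun v : Int => decide (2 ≤ List.count v nums)) numSet) = true) := by
    rw [decide_eq_true_eq]; exact_mod_cast Iff.rfl
  simp only [hp2, hp1, Bool.false_eq_true, if_false, List.append_nil, Bool.and_eq_true]
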